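-- pv_equiv track=rewrite | github.com/openvinotoolkit/open_model_zoo | tools/accuracy_checker/accuracy_checker/annotation_converters/icdar.py | is_word
-- ===== SOURCE A (Python) =====
-- def strip(text):
--     if text.lower().endswith("'s"):
--         text = text[:-2]
--     text = text.strip('-')
--     for c in "'!?.:,*\"()\N{MIDDLE DOT}[]/":
--         text = text.replace(c, ' ')
--     text = text.strip()
--
--     return text
--
-- def is_word(text):
--
--     text = strip(text)
--
--     if ' ' in text:
--         return False
--
--     if len(text) < 3:
--         return False
--
--     forbidden_symbols = "\N{MULTIPLICATION SIGN}\N{DIVISION SIGN}\N{GREEK ANO TELEIA}"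
--
--     range1 = [ord(u'a'), ord(u'z')]
--     range2 = [ord(u'A'), ord(u'Z')]
--     range3 = [ord(u'\N{LATIN CAPITAL LETTER A WITH GRAVE}'),
--               ord(u'\N{LATIN LETTER WYNN}')]
--     range4 = [ord(u'\N{LATIN CAPITAL LETTER DZ WITH CARON}'),
--               ord(u'\N{LATIN SMALL LETTER REVERSED R WITH FISHHOOK}')]
--     range5 = [ord(u'\N{GREEK CAPITAL LETTER ALPHA WITH TONOS}'),
--               ord(u'\N{GREEK CAPITAL REVERSED DOTTED LUNATE SIGMA SYMBOL}')]
--     range6 = [ord(u'-'), ord(u'-')]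
--
--     for char in text:
--         char_code = ord(char)
--         if char in forbidden_symbols:
--             return False
--
--         if not (range1[0] <= char_code <= range1[1] or
--                 range2[0] <= char_code <= range2[1] or
--                 range3[0] <= char_code <= range3[1] or
--                 range4[0] <= char_code <= range4[1] or
--                 range5[0] <= char_code <= range5[1] or
--                 range6[0] <= char_code <= range6[1]):
--             return False
--
--     return True
-- ===== SOURCE B (Python) =====
-- def strip(text):
--     if text.lower().endswith("'s"):
--         text = text[:-2]
--     text = text.strip('-')
--     for c in "'!?.:,*\"()\N{MIDDLE DOT}[]/":
--         text = text.replace(c, ' ')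
--     text = text.strip()
--
--     return text
--
-- def is_word(text):
--     text = strip(text)
--     if ' ' in text or len(text) < 3:
--         return False
--     letters = ''.join(c for c in text if c != '-')
--     return letters == '' or (letters.isascii() and letters.isalpha())
-- ===== Notes on version B (the rewrite author's own statement) =====
-- stated objective: idiomatic
-- what changed: A walks the stripped string checking each code point against six hand-coded numeric ranges plus a forbidden-symbol string with early returns; B instead filters out hyphens and applies the library predicates str.isascii/str.isalpha to the remainder (valid on the printable-ASCII input domain, where A's allowed set is exactly ASCII letters and '-').
import Mathlib
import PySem

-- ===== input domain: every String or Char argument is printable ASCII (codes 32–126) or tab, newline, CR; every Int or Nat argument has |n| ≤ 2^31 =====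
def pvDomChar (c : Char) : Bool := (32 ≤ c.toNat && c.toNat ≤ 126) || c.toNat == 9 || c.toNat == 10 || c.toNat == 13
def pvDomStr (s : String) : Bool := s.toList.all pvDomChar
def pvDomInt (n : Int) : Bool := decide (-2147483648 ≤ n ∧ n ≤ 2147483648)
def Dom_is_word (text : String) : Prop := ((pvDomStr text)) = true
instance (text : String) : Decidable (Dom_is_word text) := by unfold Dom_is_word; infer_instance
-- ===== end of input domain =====

-- B drops A's per-character code-point range chain: after the shared strip and guards it
-- filters out hyphens and applies the library predicates isascii/isalpha to the rest
-- (idiomatic; equivalence is claimed over the given printable-ASCII input domain Dom_is_word).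


-- ===== PORT A =====
-- helper `strip` (identical, verbatim, in both Pythons; shared by both ports)
def stripHelper (text : String) : String :=
  let text := if PySem.Str.endswith (PySem.Str.lower text) "'s"
              then PySem.Str.slice text none (some (-2)) else text
  let text := PySem.Str.stripChars text "-"
  -- for c in "'!?.:,*\"()·[]/": text = text.replace(c, ' ')
  let text := "'!?.:,*\"()\u00B7[]/".toList.foldl
      (fun t c => PySem.Str.replace t (String.ofList [c]) " ") text
  PySem.Str.strip text

-- `char in forbidden_symbols` for a single char is membership of the char in the string
def pvForbidden : List Char := ['\u00D7', '\u00F7', '\u0387']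

def pvRangeOk (n : Int) : Bool :=
  decide ((0x61 ≤ n ∧ n ≤ 0x7A) ∨ (0x41 ≤ n ∧ n ≤ 0x5A) ∨ (0xC0 ≤ n ∧ n ≤ 0x1BF) ∨
          (0x1C4 ≤ n ∧ n ≤ 0x27F) ∨ (0x386 ≤ n ∧ n ≤ 0x3FF) ∨ (0x2D ≤ n ∧ n ≤ 0x2D))

-- the `for char in text` loop with its two early returns
def pvCharsOk : List Char → Bool
  | [] => true
  | c :: rest =>
    if pvForbidden.contains c then false
    else if !pvRangeOk ((c.toNat : Int)) then false
    else pvCharsOk rest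

def is_word (text : String) : Bool :=
  let text := stripHelper text
  if PySem.Str.isIn " " text then false
  else if PySem.Str.len text < 3 then false
  else pvCharsOk text.toList

-- ===== PORT B =====
def is_word_alt (text : String) : Bool :=
  let text := stripHelper text
  if PySem.Str.isIn " " text || decide (PySem.Str.len text < 3) then false
  else
    -- letters = ''.join(c for c in text if c != '-')   (kept as its list of characters)
    let letters := text.toList.filter (fun c => c != '-')
    -- letters == '' or (letters.isascii() and letters.isalpha())
    -- isascii() ported by hand (exact: True iff every code point is < 128)
    letters == [] || (letters.all (fun c => decide (c.toNat ≤ 127)) && PySem.Chars.strIsalpha letters)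

-- ===== PRECONDITION & SPEC =====
def Spec_is_word (text : String) (out : Bool) : Prop := out = is_word_alt text
instance (text : String) (out : Bool) : Decidable (Spec_is_word text out) := by unfold Spec_is_word; infer_instance

-- ===== CLAIM (what is proved, stated in full; the proofs are below) =====
def Claim_equal_is_word : Prop := ∀ (text : String), Dom_is_word text → Spec_is_word text (is_word text)

-- ===== LEMMAS AND PROOFS =====

-- characters of a slice come from the sliced list
lemma pv_mem_slice {α : Type} (xs : List α) (a b : Option Int) :
    ∀ x ∈ PySem.List.slice xs a b, x ∈ xs := by
  intro x hx
  simp only [PySem.List.slice] at hx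
  exact List.mem_of_mem_drop (List.mem_of_mem_take hx)

-- characters of str.strip(chars) come from the input
lemma pv_mem_stripChars (s chars : List Char) :
    ∀ x ∈ PySem.Chars.stripChars s chars, x ∈ s := by
  intro x hx
  simp only [PySem.Chars.stripChars, List.mem_reverse] at hx
  have h1 := (List.dropWhile_sublist (l := (List.dropWhile (fun c => chars.contains c) s).reverse)
    (p := fun c => chars.contains c)).mem hx
  rw [List.mem_reverse] at h1
  exact (List.dropWhile_sublist _).mem h1

-- characters of str.strip() come from the input
lemma pv_mem_strip (s : List Char) : ∀ x ∈ PySem.Chars.strip s, x ∈ s := by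
  intro x hx
  simp only [PySem.Chars.strip, PySem.Chars.rstrip, PySem.Chars.lstrip, List.mem_reverse] at hx
  have h1 := (List.dropWhile_sublist _).mem hx
  rw [List.mem_reverse] at h1
  exact (List.dropWhile_sublist _).mem h1

-- characters of str.replace(old, new) come from the input or from new
lemma pv_mem_replace_go (old new : List Char) (fuel : Nat) :
    ∀ l acc (x : Char), x ∈ PySem.Chars.replace.go old new fuel l acc → x ∈ acc ∨ x ∈ l ∨ x ∈ new := by
  induction fuel with
  | zero => intro l acc x hx; rw [PySem.Chars.replace.go] at hx; simp at hx; tauto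
  | succ n ih =>
    intro l acc x hx
    cases l with
    | nil =>
      rw [PySem.Chars.replace.go] at hx
      · simp at hx; tauto
      · omega
    | cons c t =>
      rw [PySem.Chars.replace.go] at hx
      split at hx
      · rcases ih _ _ _ hx with h | h | h
        · simp at h; tauto
        · exact Or.inr (Or.inl (List.mem_of_mem_drop h))
        · tauto
      · rcases ih _ _ _ hx with h | h | h <;> simp at * <;> tauto

lemma pv_mem_replace (s old new : List Char) :
    ∀ x ∈ PySem.Chars.replace s old new, x ∈ s ∨ x ∈ new := by
  intro x hx
  unfold PySem.Chars.replace at hx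
  split at hx
  · simp only [List.mem_append, List.mem_flatMap, List.mem_cons] at hx
    rcases hx with h | ⟨c, hc, h | h⟩ <;> [tauto; (subst h; tauto); tauto]
  · rcases pv_mem_replace_go old new s.length s [] x hx with h | h | h <;> simp at * <;> tauto

-- the punctuation-replacing fold keeps every character ≤ 126 (it only adds spaces)
lemma pv_foldl_replace_ascii (cs : List Char) (t : String)
    (h : ∀ c ∈ t.toList, c.toNat ≤ 126) :
    ∀ c ∈ (cs.foldl (fun t c => PySem.Str.replace t (String.ofList [c]) " ") t).toList,
      c.toNat ≤ 126 := by
  induction cs generalizing t with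
  | nil => exact h
  | cons a rest ih =>
    simp only [List.foldl_cons]
    apply ih
    intro c hc
    rw [PySem.Str.toList_replace] at hc
    rcases pv_mem_replace _ _ _ c hc with hmem | hmem
    · exact h c hmem
    · simp at hmem; subst hmem; decide

-- on the printable-ASCII domain every character of strip(text) is still ≤ 126
lemma pv_stripHelper_ascii (text : String) (hdom : Dom_is_word text) :
    ∀ c ∈ (stripHelper text).toList, c.toNat ≤ 126 := by
  have hbase : ∀ c ∈ text.toList, c.toNat ≤ 126 := by
    intro c hc
    have := (List.all_eq_true.mp hdom) c hc
    simp only [pvDomChar, Bool.or_eq_true, Bool.and_eq_true, decide_eq_true_eq,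
      beq_iff_eq] at this
    omega
  have hs1 : ∀ c ∈ (if PySem.Str.endswith (PySem.Str.lower text) "'s"
      then PySem.Str.slice text none (some (-2)) else text).toList, c.toNat ≤ 126 := by
    split
    · intro c hc
      rw [PySem.Str.toList_slice, PySem.Chars.slice_eq_listSlice] at hc
      exact hbase c (pv_mem_slice _ _ _ c hc)
    · exact hbase
  have hs2 : ∀ c ∈ (PySem.Str.stripChars (if PySem.Str.endswith (PySem.Str.lower text) "'s"
      then PySem.Str.slice text none (some (-2)) else text) "-").toList, c.toNat ≤ 126 := by
    intro c hc
    rw [PySem.Str.toList_stripChars] at hc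
    exact hs1 c (pv_mem_stripChars _ _ c hc)
  have hs3 := pv_foldl_replace_ascii "'!?.:,*\"()\u00B7[]/".toList _ hs2
  intro c hc
  unfold stripHelper at hc
  rw [PySem.Str.toList_strip] at hc
  exact hs3 c (pv_mem_strip _ c hc)

-- A's per-character test, for an ASCII character, is "hyphen or ASCII letter"
lemma pv_char_eq (c : Char) (h : c.toNat ≤ 126) :
    (!pvForbidden.contains c && pvRangeOk ((c.toNat : Int))) =
      (c == '-' || PySem.Chars.isalpha c) := by
  have hforb : pvForbidden.contains c = false := by
    simp only [pvForbidden, List.contains_eq_mem, List.mem_cons, List.not_mem_nil, or_false,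
      decide_eq_false_iff_not]
    rintro (rfl | rfl | rfl) <;> simp [Char.toNat] at h
  have hdash : (c == '-') = decide (c.toNat = 45) := by
    rw [Bool.eq_iff_iff]
    simp only [beq_iff_eq, decide_eq_true_eq, Char.ext_iff, ← UInt32.toNat_inj, Char.toNat]
    constructor
    · rintro h'; rw [h']; rfl
    · intro h'; rw [h']; rfl
  have halpha : PySem.Chars.isalpha c =
      decide ((97 ≤ c.toNat ∧ c.toNat ≤ 122) ∨ (65 ≤ c.toNat ∧ c.toNat ≤ 90)) := by
    rw [Bool.eq_iff_iff]
    simp only [PySem.Chars.isalpha, PySem.Chars.isupper, PySem.Chars.islower, Char.le_def,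
      UInt32.le_iff_toNat_le, Bool.or_eq_true, Bool.and_eq_true, decide_eq_true_eq, Char.toNat]
    have h1 : 'a'.val.toNat = 97 := rfl
    have h2 : 'z'.val.toNat = 122 := rfl
    have h3 : 'A'.val.toNat = 65 := rfl
    have h4 : 'Z'.val.toNat = 90 := rfl
    omega
  rw [hforb, hdash, halpha, Bool.not_false, Bool.true_and, Bool.eq_iff_iff]
  simp only [pvRangeOk, decide_eq_true_eq, Bool.or_eq_true]
  omega

-- A's early-return loop is the all-characters check
lemma pv_charsOk_eq_all (l : List Char) :
    pvCharsOk l =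
      l.all (fun c => !pvForbidden.contains c && pvRangeOk ((c.toNat : Int))) := by
  induction l with
  | nil => rfl
  | cons c rest ih =>
    rw [pvCharsOk, List.all_cons, ih]
    by_cases hf : pvForbidden.contains c <;>
      by_cases hr : pvRangeOk ((c.toNat : Int)) <;> simp [hr]

-- B's filter-then-isalpha test equals A's all-characters check, on ASCII characters
lemma pv_filter_eq_all (l : List Char) (h : ∀ c ∈ l, c.toNat ≤ 126) :
    (l.all (fun c => !pvForbidden.contains c && pvRangeOk ((c.toNat : Int)))) =
      ((l.filter (fun c => c != '-')) == [] ||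
        ((l.filter (fun c => c != '-')).all (fun c => decide (c.toNat ≤ 127)) &&
          PySem.Chars.strIsalpha (l.filter (fun c => c != '-')))) := by
  have hall : l.all (fun c => !pvForbidden.contains c && pvRangeOk ((c.toNat : Int))) =
      l.all (fun c => c == '-' || PySem.Chars.isalpha c) := by
    rw [Bool.eq_iff_iff, List.all_eq_true, List.all_eq_true]
    exact ⟨fun hp c hc => (pv_char_eq c (h c hc)) ▸ hp c hc,
           fun hp c hc => (pv_char_eq c (h c hc)) ▸ hp c hc⟩
  rw [hall, Bool.eq_iff_iff]
  by_cases hemp : l.filter (fun c => c != '-') = []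
  · have hl : ∀ c ∈ l, c = '-' := by
      intro c hc
      have := List.filter_eq_nil_iff.mp hemp c hc
      simpa using this
    constructor
    · intro _; simp [hemp]
    · intro _
      rw [List.all_eq_true]
      intro c hc
      simp [hl c hc]
  · have hne : ((l.filter (fun c => c != '-')) == []) = false := by simpa using hemp
    have hie : (l.filter (fun c => c != '-')).isEmpty = false := by simpa using hemp
    rw [hne, Bool.false_or]
    unfold PySem.Chars.strIsalpha
    rw [hie]
    simp only [Bool.not_false, Bool.true_and]
    rw [Bool.and_eq_true, List.all_eq_true, List.all_eq_true, List.all_eq_true]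
    constructor
    · intro hp
      constructor
      · intro c hc
        exact decide_eq_true (by have := h c (List.mem_of_mem_filter hc); omega)
      · intro c hc
        rcases List.mem_filter.mp hc with ⟨hcl, hcne⟩
        have := hp c hcl
        simp only [Bool.or_eq_true, beq_iff_eq] at this
        rcases this with h' | h'
        · exact absurd h' (by simpa using hcne)
        · exact h'
    · rintro ⟨_, hp⟩ c hc
      by_cases hd : c = '-'
      · simp [hd]
      · simp only [Bool.or_eq_true, beq_iff_eq]
        exact Or.inr (hp c (List.mem_filter.mpr ⟨hc, by simpa using hd⟩))

-- ===== VERDICT (by name: the statement is the Claim_ definition above) =====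
theorem is_word_spec : Claim_equal_is_word := by
  intro text hdom
  unfold Spec_is_word is_word is_word_alt
  by_cases h1 : PySem.Str.isIn " " (stripHelper text)
  · rw [if_pos h1, if_pos (show _ = true by rw [h1]; rfl)]
  · have hb1 : PySem.Str.isIn " " (stripHelper text) = false := by simpa using h1
    by_cases h2 : PySem.Str.len (stripHelper text) < 3
    · rw [if_neg h1, if_pos h2,
        if_pos (show _ = true by rw [hb1, Bool.false_or]; exact decide_eq_true h2)]
    · rw [if_neg h1, if_neg h2,
        if_neg (show ¬_ = true by rw [hb1, Bool.false_or]; simp only [decide_eq_true_eq]; exact h2)]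
      rw [pv_charsOk_eq_all, pv_filter_eq_all _ (pv_stripHelper_ascii text hdom)]
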